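-- pv_equiv track=rewrite | github.com/kai-linux/agent-os | orchestrator/daily_digest.py | _goal_line
-- ===== SOURCE A (Python) =====
-- def _goal_line(body: str) -> str:
--     lines = body.splitlines()
--     for idx, line in enumerate(lines):
--         if line.strip().lower() == "# goal":
--             for candidate in lines[idx + 1:]:
--                 candidate = candidate.strip()
--                 if candidate:
--                     return candidate
--     return ""
-- ===== SOURCE B (Python) =====
-- def _goal_line(body: str) -> str:
--     found = False
--     for line in body.splitlines():
--         stripped = line.strip()
--         if found and stripped:
--             return stripped
--         if stripped.lower() == "# goal":
--             found = True
--     return ""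
-- ===== Notes on version B (the rewrite author's own statement) =====
-- stated objective: simpler
-- what changed: Replaced the nested loop with enumerate and list slicing by a single flat pass that sets a boolean flag at the goal header line and returns the first subsequent non-empty stripped line.
import Mathlib
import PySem

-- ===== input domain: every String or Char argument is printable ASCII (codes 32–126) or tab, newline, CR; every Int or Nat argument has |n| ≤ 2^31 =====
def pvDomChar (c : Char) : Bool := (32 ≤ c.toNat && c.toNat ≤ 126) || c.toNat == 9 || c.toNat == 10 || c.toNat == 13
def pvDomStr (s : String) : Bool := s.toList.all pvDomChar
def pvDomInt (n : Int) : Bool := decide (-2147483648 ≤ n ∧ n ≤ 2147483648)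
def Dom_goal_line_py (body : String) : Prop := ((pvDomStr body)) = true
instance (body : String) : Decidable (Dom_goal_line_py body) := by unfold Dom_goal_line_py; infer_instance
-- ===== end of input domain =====

-- B replaces A's nested loop (enumerate + slice) by one flat pass with a found-flag; objective: simpler.

-- ===== PORT A =====
-- inner 'for candidate in lines[idx+1:]' loop: some = the returned candidate, none = loop fell through
def pvAinner : List String → Option String
  | [] => none
  | c :: rest =>
    let candidate := PySem.Str.strip c
    if candidate ≠ "" then some candidate else pvAinner rest

-- outer 'for idx, line in enumerate(lines)' loop over the enumerate list
def pvAouter (lines : List String) : List (Int × String) → String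
  | [] => ""
  | (idx, line) :: rest =>
    if PySem.Str.lower (PySem.Str.strip line) = "# goal" then
      match pvAinner (PySem.List.slice lines (some (idx + 1)) none) with
      | some s => s
      | none => pvAouter lines rest
    else pvAouter lines rest

def goal_line_py (body : String) : String :=
  let lines := PySem.Str.splitlines body
  pvAouter lines (PySem.List.enumerate lines 0)

-- ===== PORT B =====
def pvBloop : List String → Bool → String
  | [], _ => ""
  | l :: rest, found =>
    let stripped := PySem.Str.strip l
    if found = true ∧ stripped ≠ "" then stripped
    else pvBloop rest (if PySem.Str.lower stripped = "# goal" then true else found)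

def goal_line_py_alt (body : String) : String :=
  pvBloop (PySem.Str.splitlines body) false

-- ===== PRECONDITION & SPEC =====
def Spec_goal_line_py (body : String) (out : String) : Prop := out = goal_line_py_alt body
instance (body : String) (out : String) : Decidable (Spec_goal_line_py body out) := by unfold Spec_goal_line_py; infer_instance

-- ===== CLAIM (what is proved, stated in full; the proofs are below) =====
def Claim_equal_goal_line_py : Prop := ∀ (body : String), Dom_goal_line_py body → Spec_goal_line_py body (goal_line_py body)

-- ===== LEMMAS AND PROOFS =====

-- after the header is found, B's loop returns the inner-loop result (or "" if none)
theorem pvBloop_true (xs : List String) :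
    pvBloop xs true = (match pvAinner xs with | some s => s | none => "") := by
  induction xs with
  | nil => simp [pvBloop, pvAinner]
  | cons l rest ih =>
    simp only [pvBloop, pvAinner]
    by_cases h : PySem.Str.strip l ≠ ""
    · simp [h]
    · simp only [h, true_and, if_false]
      have : (if PySem.Str.lower (PySem.Str.strip l) = "# goal" then true else true) = true := by
        split <;> rfl
      rw [this, ih]

-- if the inner loop falls through (all remaining lines blank), B's flagless loop also ends with ""
theorem pvBloop_false_of_inner_none (xs : List String) (h : pvAinner xs = none) :
    pvBloop xs false = "" := by
  induction xs with
  | nil => simp [pvBloop]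
  | cons l rest ih =>
    simp only [pvAinner] at h
    split_ifs at h with hs
    rw [not_ne_iff] at hs
    have hnf : ¬ PySem.Str.lower (PySem.Str.strip l) = "# goal" := by rw [hs]; decide
    simp only [pvBloop, hnf, if_false, Bool.false_eq_true, false_and]
    exact ih h

-- main invariant: A's outer loop over the enumerate of the suffix at index k equals B's flat loop on that suffix
theorem pvA_eq_pvB (suf : List String) : ∀ (lines : List String) (k : Nat),
    lines.drop k = suf →
    pvAouter lines (PySem.List.enumerate suf (k : Int)) = pvBloop suf false := by
  induction suf with
  | nil => intro lines k _; simp [pvAouter, pvBloop, PySem.List.enumerate_nil]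
  | cons l rest ih =>
    intro lines k hdrop
    rw [PySem.List.enumerate_cons]
    have hdrop' : lines.drop (k + 1) = rest := by
      rw [← List.tail_drop, hdrop]; rfl
    have hcast : ((k : Int) + 1) = ((k + 1 : Nat) : Int) := by push_cast; ring
    have hslice : PySem.List.slice lines (some ((k : Int) + 1)) none = rest := by
      rw [hcast, PySem.List.slice_from_natCast, hdrop']
    have ihk := ih lines (k + 1) hdrop'
    simp only [pvAouter, pvBloop, Bool.false_eq_true, false_and, if_false]
    by_cases hh : PySem.Str.lower (PySem.Str.strip l) = "# goal"
    · simp only [hh, if_true, hslice]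
      rw [pvBloop_true]
      cases hin : pvAinner rest with
      | some s => simp
      | none =>
        simp only
        rw [hcast, ihk, pvBloop_false_of_inner_none rest hin]
    · simp only [hh, if_false]
      rw [hcast, ihk]

-- ===== VERDICT (by name: the statement is the Claim_ definition above) =====
theorem goal_line_py_spec : Claim_equal_goal_line_py := by
  intro body _
  unfold Spec_goal_line_py goal_line_py goal_line_py_alt
  exact pvA_eq_pvB (PySem.Str.splitlines body) (PySem.Str.splitlines body) 0 rfl
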